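-- pv_equiv track=rewrite | github.com/joakiol/GeneticTrains | trains.py | calcNumTrain
-- ===== SOURCE A (Python) =====
-- def calcNumTrain(startTimeOne, startTimeTwo, frequencyOne, frequencyTwo, time):
--     number=0
--     trainTypes=[]
--     for i in range(time+1):
--         if startTimeOne==0:
--             number+=1
--             startTimeOne+=frequencyOne
--             trainTypes.append(1)
--         if startTimeTwo== 0:
--             number += 1
--             startTimeTwo += frequencyTwo
--             trainTypes.append(2)
--         startTimeOne-=1
--         startTimeTwo-=1
--
--     return number, trainTypes
-- ===== SOURCE B (Python) =====
-- def calcNumTrain(startTimeOne, startTimeTwo, frequencyOne, frequencyTwo, time):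
--     def departures(start, freq):
--         if start < 0 or start > time:
--             return []
--         return list(range(start, time + 1, freq))
--
--     t1 = departures(startTimeOne, frequencyOne)
--     t2 = departures(startTimeTwo, frequencyTwo)
--     merged = []
--     i = j = 0
--     while i < len(t1) and j < len(t2):
--         if t1[i] <= t2[j]:
--             merged.append(1)
--             i += 1
--         else:
--             merged.append(2)
--             j += 1
--     merged += [1] * (len(t1) - i)
--     merged += [2] * (len(t2) - j)
--     return len(merged), merged
-- ===== Notes on version B (the rewrite author's own statement) =====
-- stated objective: faster
-- what changed: Instead of simulating every minute with countdown counters, B generates each train type's departure minutes as an arithmetic progression (range) and merges the two progressions by time, type 1 first on ties; Pre_ excludes inputs where a type has nonpositive frequency and its start lies inside [0, time], on which A's single-departure value is an accident of its countdown and B's range either raises (step 0) or yields no departures (negative step).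
-- outside the precondition, e.g. on calcNumTrain(0, 5, -3, 1, 10): A returns (7, [1, 2, 2, 2, 2, 2, 2]), B returns (6, [2, 2, 2, 2, 2, 2]); on calcNumTrain(0, 5, 0, 1, 10): A returns (7, [1, 2, 2, 2, 2, 2, 2]), B raises ValueError
import Mathlib
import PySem

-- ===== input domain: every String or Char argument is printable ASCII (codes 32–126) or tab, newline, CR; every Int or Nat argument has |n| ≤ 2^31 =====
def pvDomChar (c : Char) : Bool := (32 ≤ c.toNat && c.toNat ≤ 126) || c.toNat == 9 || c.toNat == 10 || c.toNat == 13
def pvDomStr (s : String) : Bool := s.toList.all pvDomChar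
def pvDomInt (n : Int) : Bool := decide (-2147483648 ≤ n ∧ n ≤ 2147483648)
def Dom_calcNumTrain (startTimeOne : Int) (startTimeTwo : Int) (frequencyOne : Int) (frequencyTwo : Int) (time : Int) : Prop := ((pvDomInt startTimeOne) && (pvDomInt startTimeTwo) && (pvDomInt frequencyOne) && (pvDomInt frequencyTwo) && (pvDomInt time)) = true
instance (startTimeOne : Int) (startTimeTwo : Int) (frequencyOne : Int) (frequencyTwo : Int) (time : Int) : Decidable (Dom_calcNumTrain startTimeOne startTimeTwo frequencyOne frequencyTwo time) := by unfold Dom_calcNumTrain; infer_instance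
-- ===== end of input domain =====

-- B replaces A's minute-by-minute simulation by generating each type's departure minutes
-- as an arithmetic progression and merging the two progressions by time (type 1 first on ties).

-- ===== PORT A =====
-- the body of A's for-loop, one minute of simulation (state: number, startTimeOne, startTimeTwo, trainTypes)
def pvStepA (frequencyOne frequencyTwo : Int) (st : Int × Int × Int × List Int) : Int × Int × Int × List Int :=
  let (number, a, b, tt) := st
  let (number, a, tt) := if a = 0 then (number + 1, a + frequencyOne, tt ++ [1]) else (number, a, tt)
  let (number, b, tt) := if b = 0 then (number + 1, b + frequencyTwo, tt ++ [2]) else (number, b, tt)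
  (number, a - 1, b - 1, tt)

def calcNumTrain (startTimeOne : Int) (startTimeTwo : Int) (frequencyOne : Int) (frequencyTwo : Int) (time : Int) : Int × List Int :=
  let st := (PySem.List.pyRange 0 (time + 1) 1).foldl
    (fun st _ => pvStepA frequencyOne frequencyTwo st) (0, startTimeOne, startTimeTwo, [])
  (st.1, st.2.2.2)

-- ===== PORT B =====
-- Source B's `departures`: the departure minutes of one train type within the window [0, time]
def pvTimes (start freq time : Int) : List Int :=
  if start < 0 ∨ start > time then []
  else PySem.List.pyRange start (time + 1) freq

-- Source B's merge-by-indices loop, as structural recursion consuming the heads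
def pvMerge : List Int → List Int → List Int
  | [], t2 => t2.map (fun _ => 2)
  | a :: t1, [] => (a :: t1).map (fun _ => 1)
  | a :: t1, b :: t2 => if a ≤ b then 1 :: pvMerge t1 (b :: t2) else 2 :: pvMerge (a :: t1) t2

def calcNumTrain_alt (startTimeOne : Int) (startTimeTwo : Int) (frequencyOne : Int) (frequencyTwo : Int) (time : Int) : Int × List Int :=
  let merged := pvMerge (pvTimes startTimeOne frequencyOne time) (pvTimes startTimeTwo frequencyTwo time)
  ((merged.length : Int), merged)

-- ===== PRECONDITION & SPEC =====
-- Pre_ excludes inputs where a train type has nonpositive frequency and its start lies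
-- inside [0, time]: frequency is then meaningless, A's countdown accidentally yields exactly
-- one departure for that type, while B's arithmetic progression raises a ValueError
-- (step 0) or naturally yields no departures (negative step).
def Pre_calcNumTrain (startTimeOne : Int) (startTimeTwo : Int) (frequencyOne : Int) (frequencyTwo : Int) (time : Int) : Prop :=
  ¬(frequencyOne ≤ 0 ∧ 0 ≤ startTimeOne ∧ startTimeOne ≤ time) ∧
  ¬(frequencyTwo ≤ 0 ∧ 0 ≤ startTimeTwo ∧ startTimeTwo ≤ time)
instance (startTimeOne : Int) (startTimeTwo : Int) (frequencyOne : Int) (frequencyTwo : Int) (time : Int) : Decidable (Pre_calcNumTrain startTimeOne startTimeTwo frequencyOne frequencyTwo time) := by unfold Pre_calcNumTrain; infer_instance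

def pvWitness_calcNumTrain : Int × Int × Int × Int × Int := (0, 1, 2, 3, 5)

def Spec_calcNumTrain (startTimeOne : Int) (startTimeTwo : Int) (frequencyOne : Int) (frequencyTwo : Int) (time : Int) (out : Int × List Int) : Prop := out = calcNumTrain_alt startTimeOne startTimeTwo frequencyOne frequencyTwo time
instance (startTimeOne : Int) (startTimeTwo : Int) (frequencyOne : Int) (frequencyTwo : Int) (time : Int) (out : Int × List Int) : Decidable (Spec_calcNumTrain startTimeOne startTimeTwo frequencyOne frequencyTwo time out) := by unfold Spec_calcNumTrain; infer_instance

-- ===== CLAIM (what is proved, stated in full; the proofs are below) =====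
def Claim_equal_calcNumTrain : Prop := ∀ (startTimeOne : Int) (startTimeTwo : Int) (frequencyOne : Int) (frequencyTwo : Int) (time : Int), Dom_calcNumTrain startTimeOne startTimeTwo frequencyOne frequencyTwo time → Pre_calcNumTrain startTimeOne startTimeTwo frequencyOne frequencyTwo time → Spec_calcNumTrain startTimeOne startTimeTwo frequencyOne frequencyTwo time (calcNumTrain startTimeOne startTimeTwo frequencyOne frequencyTwo time)

-- ===== LEMMAS AND PROOFS =====

-- folding a function that ignores the elements is iteration by the length
theorem pv_foldl_const {α β : Type} (g : β → β) : ∀ (l : List α) (init : β),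
    l.foldl (fun st _ => g st) init = g^[l.length] init := by
  intro l
  induction l with
  | nil => intro init; rfl
  | cons x xs ih =>
      intro init
      simp [List.foldl, ih, Function.iterate_succ_apply]

-- the departure minutes of one type within the first n minutes, by minute-recursion
def pvTimesN : Nat → Int → Int → List Int
  | 0, _, _ => []
  | n + 1, s, f =>
      if s = 0 then 0 :: (pvTimesN n (f - 1) f).map (· + 1)
      else (pvTimesN n (s - 1) f).map (· + 1)

theorem pvTimesN_nonneg : ∀ (n : Nat) (s f : Int) (x : Int), x ∈ pvTimesN n s f → 0 ≤ x := by
  intro n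
  induction n with
  | zero => intro s f x hx; simp [pvTimesN] at hx
  | succ n ih =>
      intro s f x hx
      by_cases hs : s = 0
      · simp [pvTimesN, hs] at hx
        rcases hx with h | ⟨y, hy, rfl⟩
        · omega
        · have := ih (f - 1) f y hy; omega
      · simp [pvTimesN, hs] at hx
        rcases hx with ⟨y, hy, rfl⟩
        have := ih (s - 1) f y hy; omega

-- shift: map (+1) over a positive-step range shifts both endpoints
theorem pv_pyRange_shift (a b f : Int) (hf : 0 < f) :
    (PySem.List.pyRange a b f).map (· + 1) = PySem.List.pyRange (a + 1) (b + 1) f := by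
  rw [PySem.List.pyRange_of_pos _ _ hf, PySem.List.pyRange_of_pos _ _ hf]
  have h1 : ((b + 1) - (a + 1) + f - 1) = (b - a + f - 1) := by ring
  rw [h1]
  by_cases hab : a < b
  · rw [if_pos hab, if_pos (by omega), List.map_map]
    apply List.map_congr_left
    intro k _
    simp; ring
  · rw [if_neg hab, if_neg (by omega)]
    simp

-- cons: a positive-step nonempty range is its head followed by the shifted range
theorem pv_pyRange_pos_cons (a b f : Int) (hf : 0 < f) (hab : a < b) :
    PySem.List.pyRange a b f = a :: PySem.List.pyRange (a + f) b f := by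
  rw [PySem.List.pyRange_of_pos _ _ hf, PySem.List.pyRange_of_pos _ _ hf]
  by_cases h : a + f < b
  · have hcount : ((b - a + f - 1) / f).toNat = ((b - (a + f) + f - 1) / f).toNat + 1 := by
      have he : b - a + f - 1 = (b - (a + f) + f - 1) + 1 * f := by ring
      have := Int.add_mul_ediv_right (b - (a + f) + f - 1) 1 (show f ≠ 0 by omega)
      have hnn : 0 ≤ (b - (a + f) + f - 1) / f := by
        apply Int.ediv_nonneg <;> omega
      rw [he, this]
      omega
    simp only [if_pos hab, if_pos h, hcount, List.range_succ_eq_map, List.map_cons, List.map_map]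
    congr 1
    · simp
    · apply List.map_congr_left
      intro k _
      simp; ring
  · -- exactly one element: b ≤ a + f
    have hq : (b - a + f - 1) / f = 1 := by
      have he : b - a + f - 1 = (b - a - 1) + 1 * f := by ring
      rw [he, Int.add_mul_ediv_right _ _ (show f ≠ 0 by omega),
        Int.ediv_eq_zero_of_lt (by omega) (by omega)]
      ring
    simp only [if_pos hab, if_neg h, hq]
    norm_num

-- Source B's `departures` equals the minute-recursion description, given that the frequency is
-- positive whenever the start lies inside the window
theorem pvTimes_eq : ∀ (n : Nat) (s f time : Int), (time + 1).toNat = n →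
    (0 < f ∨ s < 0 ∨ s > time) →
    pvTimes s f time = pvTimesN n s f := by
  intro n
  induction n with
  | zero =>
      intro s f time h _
      have ht : time < 0 := by omega
      unfold pvTimes pvTimesN
      rw [if_pos]
      omega
  | succ n ih =>
      intro s f time h hok
      have ht : 0 ≤ time := by omega
      have h' : ((time - 1) + 1).toNat = n := by omega
      have htm : time - 1 + 1 = time := by ring
      by_cases hs : s = 0
      · subst hs
        have hf' : 0 < f := by rcases hok with h | h | h <;> omega
        unfold pvTimesN
        rw [if_pos rfl, ← ih (f - 1) f (time - 1) h' (Or.inl hf')]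
        unfold pvTimes
        rw [if_neg (show ¬((0:Int) < 0 ∨ (0:Int) > time) by omega)]
        by_cases hfe : f - 1 > time - 1
        · rw [if_pos (show f - 1 < 0 ∨ f - 1 > time - 1 from Or.inr hfe)]
          rw [pv_pyRange_pos_cons 0 (time + 1) f hf' (by omega)]
          rw [PySem.List.pyRange_of_pos _ _ hf', if_neg (by omega)]
          simp
        · rw [if_neg (show ¬(f - 1 < 0 ∨ f - 1 > time - 1) by omega),
            pv_pyRange_shift _ _ _ hf', htm, show f - 1 + 1 = f by ring]
          have hc := pv_pyRange_pos_cons 0 (time + 1) f hf' (by omega)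
          rw [show (0:Int) + f = f by ring] at hc
          exact hc
      · unfold pvTimesN
        rw [if_neg hs]
        by_cases hneg : s < 0
        · rw [← ih (s - 1) f (time - 1) h' (Or.inr (Or.inl (by omega)))]
          unfold pvTimes
          rw [if_pos (Or.inl hneg),
            if_pos (show s - 1 < 0 ∨ s - 1 > time - 1 from Or.inl (by omega))]
          simp
        · by_cases hbig : s > time
          · rw [← ih (s - 1) f (time - 1) h' (Or.inr (Or.inr (by omega)))]
            unfold pvTimes
            rw [if_pos (Or.inr hbig),
              if_pos (show s - 1 < 0 ∨ s - 1 > time - 1 from Or.inr (by omega))]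
            simp
          · have hf' : 0 < f := by rcases hok with h | h | h <;> omega
            rw [← ih (s - 1) f (time - 1) h' (Or.inl hf')]
            unfold pvTimes
            rw [if_neg (show ¬(s < 0 ∨ s > time) by omega),
              if_neg (show ¬(s - 1 < 0 ∨ s - 1 > time - 1) by omega),
              pv_pyRange_shift _ _ _ hf', htm, show s - 1 + 1 = s by ring]

-- merging shifted lists merges the originals
theorem pvMerge_shift : ∀ (x y : List Int),
    pvMerge (x.map (· + 1)) (y.map (· + 1)) = pvMerge x y := by
  intro x y
  fun_induction pvMerge x y with
  | case1 t2 => simp [pvMerge, Function.comp_def]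
  | case2 a t1 => simp [pvMerge, Function.comp_def]
  | case3 a t1 b t2 hab ih =>
      simp only [List.map_cons] at ih
      simp only [List.map_cons, pvMerge, if_pos (show a + 1 ≤ b + 1 by omega)]
      rw [ih]
  | case4 a t1 b t2 hab ih =>
      simp only [List.map_cons] at ih
      simp only [List.map_cons, pvMerge, if_neg (show ¬ a + 1 ≤ b + 1 by omega)]
      rw [ih]

theorem pvMerge_zero_left (x y : List Int) (hy : ∀ c ∈ y, 0 ≤ c) :
    pvMerge (0 :: x) y = 1 :: pvMerge x y := by
  cases y with
  | nil => cases x <;> simp [pvMerge]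
  | cons c ys => rw [pvMerge, if_pos (hy c (by simp))]

theorem pvMerge_zero_right (x y : List Int) (hx : ∀ c ∈ x, 1 ≤ c) :
    pvMerge x (0 :: y) = 2 :: pvMerge x y := by
  cases x with
  | nil => simp [pvMerge]
  | cons c xs =>
      rw [pvMerge, if_neg (by have := hx c (by simp); omega)]

theorem pvTimesN_map_pos (n : Nat) (s f : Int) :
    ∀ c ∈ (pvTimesN n s f).map (· + 1), 1 ≤ c := by
  intro c hc
  simp at hc
  rcases hc with ⟨y, hy, rfl⟩
  have := pvTimesN_nonneg n s f y hy
  omega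

theorem pvTimesN_map_nonneg (n : Nat) (s f : Int) :
    ∀ c ∈ (pvTimesN n s f).map (· + 1), 0 ≤ c := by
  intro c hc
  have := pvTimesN_map_pos n s f c hc
  omega

-- main loop invariant: n minutes of A's simulation produce the merge of the two
-- minute-recursion progressions, appended to the accumulator
theorem pv_loop (f1 f2 : Int) : ∀ (n : Nat) (num a b : Int) (acc : List Int),
    ∃ a' b', (pvStepA f1 f2)^[n] (num, a, b, acc) =
      (num + ((pvMerge (pvTimesN n a f1) (pvTimesN n b f2)).length : Int), a', b',
       acc ++ pvMerge (pvTimesN n a f1) (pvTimesN n b f2)) := by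
  intro n
  induction n with
  | zero =>
      intro num a b acc
      exact ⟨a, b, by simp [pvTimesN, pvMerge]⟩
  | succ n ih =>
      intro num a b acc
      rw [Function.iterate_succ_apply]
      by_cases ha : a = 0 <;> by_cases hb : b = 0
      · -- both fire: 1 then 2
        subst ha; subst hb
        have hstep : pvStepA f1 f2 (num, 0, 0, acc) = (num + 2, f1 - 1, f2 - 1, acc ++ [1, 2]) := by
          simp [pvStepA]
          omega
        obtain ⟨a', b', hI⟩ := ih (num + 2) (f1 - 1) (f2 - 1) (acc ++ [1, 2])
        refine ⟨a', b', ?_⟩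
        have hm : pvMerge (pvTimesN (n + 1) 0 f1) (pvTimesN (n + 1) 0 f2) =
            1 :: 2 :: pvMerge (pvTimesN n (f1 - 1) f1) (pvTimesN n (f2 - 1) f2) := by
          rw [show pvTimesN (n + 1) 0 f1 = 0 :: (pvTimesN n (f1 - 1) f1).map (· + 1) by
                simp [pvTimesN],
              show pvTimesN (n + 1) 0 f2 = 0 :: (pvTimesN n (f2 - 1) f2).map (· + 1) by
                simp [pvTimesN]]
          rw [pvMerge_zero_left _ _ (by
            intro c hc
            rcases List.mem_cons.mp hc with h | h
            · omega
            · exact pvTimesN_map_nonneg _ _ _ c h)]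
          rw [pvMerge_zero_right _ _ (pvTimesN_map_pos n (f1 - 1) f1), pvMerge_shift]
        rw [hstep, hI, hm]
        refine Prod.ext ?_ (Prod.ext rfl (Prod.ext rfl ?_))
        · simp; ring
        · simp
      · -- only type 1 fires
        subst ha
        have hstep : pvStepA f1 f2 (num, 0, b, acc) = (num + 1, f1 - 1, b - 1, acc ++ [1]) := by
          simp [pvStepA, hb]
        obtain ⟨a', b', hI⟩ := ih (num + 1) (f1 - 1) (b - 1) (acc ++ [1])
        refine ⟨a', b', ?_⟩
        have hm : pvMerge (pvTimesN (n + 1) 0 f1) (pvTimesN (n + 1) b f2) =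
            1 :: pvMerge (pvTimesN n (f1 - 1) f1) (pvTimesN n (b - 1) f2) := by
          rw [show pvTimesN (n + 1) 0 f1 = 0 :: (pvTimesN n (f1 - 1) f1).map (· + 1) by
                simp [pvTimesN],
              show pvTimesN (n + 1) b f2 = (pvTimesN n (b - 1) f2).map (· + 1) by
                simp [pvTimesN, hb]]
          rw [pvMerge_zero_left _ _ (pvTimesN_map_nonneg n (b - 1) f2), pvMerge_shift]
        rw [hstep, hI, hm]
        refine Prod.ext ?_ (Prod.ext rfl (Prod.ext rfl ?_))
        · simp; ring
        · simp
      · -- only type 2 fires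
        subst hb
        have hstep : pvStepA f1 f2 (num, a, 0, acc) = (num + 1, a - 1, f2 - 1, acc ++ [2]) := by
          simp [pvStepA, ha]
        obtain ⟨a', b', hI⟩ := ih (num + 1) (a - 1) (f2 - 1) (acc ++ [2])
        refine ⟨a', b', ?_⟩
        have hm : pvMerge (pvTimesN (n + 1) a f1) (pvTimesN (n + 1) 0 f2) =
            2 :: pvMerge (pvTimesN n (a - 1) f1) (pvTimesN n (f2 - 1) f2) := by
          rw [show pvTimesN (n + 1) a f1 = (pvTimesN n (a - 1) f1).map (· + 1) by
                simp [pvTimesN, ha],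
              show pvTimesN (n + 1) 0 f2 = 0 :: (pvTimesN n (f2 - 1) f2).map (· + 1) by
                simp [pvTimesN]]
          rw [pvMerge_zero_right _ _ (pvTimesN_map_pos n (a - 1) f1), pvMerge_shift]
        rw [hstep, hI, hm]
        refine Prod.ext ?_ (Prod.ext rfl (Prod.ext rfl ?_))
        · simp; ring
        · simp
      · -- nobody fires
        have hstep : pvStepA f1 f2 (num, a, b, acc) = (num, a - 1, b - 1, acc) := by
          simp [pvStepA, ha, hb]
        obtain ⟨a', b', hI⟩ := ih num (a - 1) (b - 1) acc
        refine ⟨a', b', ?_⟩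
        have hm : pvMerge (pvTimesN (n + 1) a f1) (pvTimesN (n + 1) b f2) =
            pvMerge (pvTimesN n (a - 1) f1) (pvTimesN n (b - 1) f2) := by
          rw [show pvTimesN (n + 1) a f1 = (pvTimesN n (a - 1) f1).map (· + 1) by
                simp [pvTimesN, ha],
              show pvTimesN (n + 1) b f2 = (pvTimesN n (b - 1) f2).map (· + 1) by
                simp [pvTimesN, hb]]
          rw [pvMerge_shift]
        rw [hstep, hI, hm]

-- ===== VERDICT (by name: the statement is the Claim_ definition above) =====
theorem calcNumTrain_spec : Claim_equal_calcNumTrain := by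
  intro s1 s2 f1 f2 time _ hpre
  obtain ⟨h1, h2⟩ := hpre
  unfold Spec_calcNumTrain calcNumTrain calcNumTrain_alt
  rw [pv_foldl_const (pvStepA f1 f2)]
  have hlen : (PySem.List.pyRange 0 (time + 1) 1).length = (time + 1).toNat := by
    rw [PySem.List.length_pyRange_one]; norm_num
  rw [hlen]
  obtain ⟨a', b', h⟩ := pv_loop f1 f2 (time + 1).toNat 0 s1 s2 []
  rw [h]
  rw [pvTimes_eq (time + 1).toNat s1 f1 time rfl (by omega),
    pvTimes_eq (time + 1).toNat s2 f2 time rfl (by omega)]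
  simp
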